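-- pv_equiv track=rewrite | github.com/atzinas/advent_of_code_2019 | day_6/day_6_part_2.py | DFS
-- ===== SOURCE A (Python) =====
-- def DFS(node, neibours, visited, node_depth):
--     result = 0
--     if node == 'SAN':
--         result = node_depth
--     if node not in visited and node in neibours:
--         visited.append(node)
--         for neibour in neibours[node]:
--            result += DFS(neibour, neibours, visited, node_depth + 1)
--     return result;
-- ===== SOURCE B (Python) =====
-- def DFS(node, neibours, visited, node_depth):
--     # Iterative DFS with an explicit stack of (node, depth) frames; same
--     # visited-list mutation (append order) as the recursive original.
--     acc = 0
--     stack = [(node, node_depth)]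
--     while stack:
--         n, d = stack.pop()
--         if n == 'SAN':
--             acc += d
--         if n not in visited and n in neibours:
--             visited.append(n)
--             for child in reversed(neibours[n]):
--                 stack.append((child, d + 1))
--     return acc
-- ===== Notes on version B (the rewrite author's own statement) =====
-- stated objective: alternative
-- what changed: Replaces the recursive DFS with an iterative while-loop over an explicit stack of (node, depth) frames and a running accumulator, pushing children in reversed order so the visited list is mutated in the same pre-order.
import Mathlib
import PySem

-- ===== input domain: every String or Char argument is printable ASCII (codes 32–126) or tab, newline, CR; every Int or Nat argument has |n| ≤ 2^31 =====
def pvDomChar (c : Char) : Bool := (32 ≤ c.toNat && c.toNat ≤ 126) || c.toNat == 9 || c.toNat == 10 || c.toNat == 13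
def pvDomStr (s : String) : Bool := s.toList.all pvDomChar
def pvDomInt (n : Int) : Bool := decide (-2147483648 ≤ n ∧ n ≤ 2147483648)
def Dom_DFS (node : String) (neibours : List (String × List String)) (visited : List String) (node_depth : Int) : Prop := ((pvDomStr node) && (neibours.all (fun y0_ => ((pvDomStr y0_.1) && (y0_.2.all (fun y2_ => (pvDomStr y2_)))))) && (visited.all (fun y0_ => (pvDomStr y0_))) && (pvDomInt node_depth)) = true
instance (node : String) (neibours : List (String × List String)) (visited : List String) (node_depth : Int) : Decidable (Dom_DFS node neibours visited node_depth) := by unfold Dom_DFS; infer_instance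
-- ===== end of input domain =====

-- B replaces the recursive DFS by an iterative one with an explicit (node, depth) stack and a
-- running accumulator (objective: alternative decomposition, same cost). Both versions append to
-- `visited` in the same order; the equivalence proved here is about the return value.


-- ===== PORT A =====
-- `neibours[n]` on the dict (association list, unique keys): first match, exact for a Python dict
def pvChildren (nb : List (String × List String)) (k : String) : List String :=
  ((nb.find? (fun p => p.1 == k)).map Prod.snd).getD []

-- A's recursion step for step, returning (result, visited); the fuel guard only makes it total:
-- its 0-branch returns exactly what a guard-false call returns, and `go_fuel_congr` below proves
-- the result fuel-independent once fuel exceeds the number of distinct unvisited keys, which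
-- the initial fuel nb.length + 1 always does.
def DFS_go (fuel : Nat) (node : String) (nb : List (String × List String)) (visited : List String) (d : Int) : Int × List String :=
  let result : Int := if node == "SAN" then d else 0
  match fuel with
  | 0 => (result, visited)
  | f+1 =>
    if !(visited.contains node) && (nb.map Prod.fst).contains node then
      (pvChildren nb node).foldl
        (fun p c => let r := DFS_go f c nb p.2 (d+1); (p.1 + r.1, r.2))
        (result, visited ++ [node])
    else (result, visited)

def DFS (node : String) (neibours : List (String × List String)) (visited : List String) (node_depth : Int) : Int :=
  (DFS_go (neibours.length + 1) node neibours visited node_depth).1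

-- ===== PORT B =====
-- Source B's while-loop over the explicit stack (Lean list head = Python list end = top of stack);
-- pushing the reversed children one by one is the foldl over `.reverse`. Fuel decreases only
-- when a node is expanded (each expansion consumes a fresh key, so fuel never runs out).
def DFS_alt_loop (fuel : Nat) (nb : List (String × List String)) (stack : List (String × Int)) (visited : List String) (acc : Int) : Int :=
  match stack with
  | [] => acc
  | (n, d) :: rest =>
    let acc' : Int := if n == "SAN" then acc + d else acc
    if !(visited.contains n) && (nb.map Prod.fst).contains n then
      match fuel with
      | 0 => acc'
      | f+1 =>
        DFS_alt_loop f nb ((pvChildren nb n).reverse.foldl (fun st c => (c, d+1) :: st) rest)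
          (visited ++ [n]) acc'
    else DFS_alt_loop fuel nb rest visited acc'
termination_by (fuel, stack.length)

def DFS_alt (node : String) (neibours : List (String × List String)) (visited : List String) (node_depth : Int) : Int :=
  DFS_alt_loop (neibours.length + 1) neibours [(node, node_depth)] visited 0

-- ===== PRECONDITION & SPEC =====
def Spec_DFS (node : String) (neibours : List (String × List String)) (visited : List String) (node_depth : Int) (out : Int) : Prop := out = DFS_alt node neibours visited node_depth
instance (node : String) (neibours : List (String × List String)) (visited : List String) (node_depth : Int) (out : Int) : Decidable (Spec_DFS node neibours visited node_depth out) := by unfold Spec_DFS; infer_instance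

-- ===== CLAIM (what is proved, stated in full; the proofs are below) =====
def Claim_equal_DFS : Prop := ∀ (node : String) (neibours : List (String × List String)) (visited : List String) (node_depth : Int), Dom_DFS node neibours visited node_depth → Spec_DFS node neibours visited node_depth (DFS node neibours visited node_depth)

-- ===== LEMMAS AND PROOFS =====

-- number of distinct keys of nb not yet visited: the fuel bound for both loops
def pvU (nb : List (String × List String)) (v : List String) : Nat :=
  ((nb.map Prod.fst).dedup).countP (fun k => !(v.contains k))

lemma pvU_mono (nb : List (String × List String)) {v w : List String}
    (h : ∀ x, v.contains x = true → w.contains x = true) : pvU nb w ≤ pvU nb v := by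
  apply List.countP_mono_left
  intro a _ ha
  simp only [Bool.not_eq_eq_eq_not, Bool.not_true] at *
  cases hvc : v.contains a with
  | false => rfl
  | true => exact absurd (h a hvc) (by simpa using ha)

lemma pvU_append_lt (nb : List (String × List String)) {v : List String} {n : String}
    (hk : n ∈ nb.map Prod.fst) (hv : v.contains n = false) :
    pvU nb (v ++ [n]) < pvU nb v := by
  unfold pvU
  have hm : n ∈ (nb.map Prod.fst).dedup := List.mem_dedup.mpr hk
  obtain ⟨l₁, l₂, he⟩ := List.append_of_mem hm
  rw [he]
  simp only [List.countP_append, List.countP_cons]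
  have h1 : l₁.countP (fun k => !((v ++ [n]).contains k)) ≤ l₁.countP (fun k => !(v.contains k)) := by
    apply List.countP_mono_left; intro a _ ha
    simp only [List.contains_append, Bool.not_eq_eq_eq_not, Bool.not_true, Bool.or_eq_false_iff] at *
    exact ha.1
  have h2 : l₂.countP (fun k => !((v ++ [n]).contains k)) ≤ l₂.countP (fun k => !(v.contains k)) := by
    apply List.countP_mono_left; intro a _ ha
    simp only [List.contains_append, Bool.not_eq_eq_eq_not, Bool.not_true, Bool.or_eq_false_iff] at *
    exact ha.1
  have hn1 : (!((v ++ [n]).contains n)) = false := by simp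
  have hn2 : (!(v.contains n)) = true := by rw [hv]; rfl
  simp only [hn1, hn2, if_true, Bool.false_eq_true, if_false]
  omega

lemma pvU_le_len (nb : List (String × List String)) (v : List String) :
    pvU nb v ≤ nb.length := by
  calc pvU nb v ≤ ((nb.map Prod.fst).dedup).length := List.countP_le_length
    _ ≤ (nb.map Prod.fst).length := (List.dedup_sublist _).length_le
    _ = nb.length := List.length_map ..

lemma fold_U_le (nb : List (String × List String)) (f : Nat) (d : Int)
    (ih : ∀ n v d', pvU nb ((DFS_go f n nb v d').2) ≤ pvU nb v) :
    ∀ (cs : List String) (p : Int × List String),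
      pvU nb ((cs.foldl (fun p c => let r := DFS_go f c nb p.2 (d+1); (p.1 + r.1, r.2)) p).2) ≤ pvU nb p.2 := by
  intro cs
  induction cs with
  | nil => intro p; simp
  | cons c cs ihc =>
    intro p
    simp only [List.foldl_cons]
    exact le_trans (ihc _) (ih c p.2 (d+1))

lemma go_U_le (nb : List (String × List String)) :
    ∀ (f : Nat) (n : String) (v : List String) (d : Int),
      pvU nb ((DFS_go f n nb v d).2) ≤ pvU nb v := by
  intro f
  induction f with
  | zero => intro n v d; simp [DFS_go]
  | succ f ih =>
    intro n v d
    simp only [DFS_go]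
    split
    · refine le_trans (fold_U_le nb f d (fun n v d' => ih n v d') _ _) ?_
      exact pvU_mono nb (fun x hx => by simp [List.contains_append] at hx ⊢; exact Or.inl hx)
    · exact le_refl _

lemma go_fuel_congr (nb : List (String × List String)) :
    ∀ (f g : Nat) (n : String) (v : List String) (d : Int),
      pvU nb v < f → pvU nb v < g → DFS_go f n nb v d = DFS_go g n nb v d := by
  intro f
  induction f with
  | zero => intro g n v d hf; omega
  | succ f ih =>
    intro g n v d hf hg
    cases g with
    | zero => omega
    | succ g =>
      simp only [DFS_go]
      split
      · rename_i hguard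
        have hkey : (nb.map Prod.fst).contains n = true := by
          rcases Bool.and_eq_true_iff.mp hguard with ⟨_, h2⟩; exact h2
        have hnv : v.contains n = false := by
          rcases Bool.and_eq_true_iff.mp hguard with ⟨h1, _⟩
          cases hc : v.contains n
          · rfl
          · rw [hc] at h1; simp at h1
        have hlt : pvU nb (v ++ [n]) < pvU nb v :=
          pvU_append_lt nb (by simpa using hkey) hnv
        have main : ∀ (cs : List String) (p : Int × List String), pvU nb p.2 < f → pvU nb p.2 < g →
            cs.foldl (fun p c => let r := DFS_go f c nb p.2 (d+1); (p.1 + r.1, r.2)) p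
              = cs.foldl (fun p c => let r := DFS_go g c nb p.2 (d+1); (p.1 + r.1, r.2)) p := by
          intro cs
          induction cs with
          | nil => intro p _ _; rfl
          | cons c cs ihc =>
            intro p hpf hpg
            simp only [List.foldl_cons]
            rw [ih g c p.2 (d+1) hpf hpg]
            apply ihc
            · exact lt_of_le_of_lt (by rw [← ih g c p.2 (d+1) hpf hpg]; exact go_U_le nb f c p.2 (d+1)) hpf
            · exact lt_of_le_of_lt (by rw [← ih g c p.2 (d+1) hpf hpg]; exact go_U_le nb f c p.2 (d+1)) hpg
        have h1 : pvU nb (v ++ [n]) < f := by omega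
        have h2 : pvU nb (v ++ [n]) < g := by omega
        exact main _ _ h1 h2
      · rfl

-- A's result, frame after frame, threading visited; each call gets a sufficient fuel
def runA (nb : List (String × List String)) (frames : List (String × Int)) (v : List String) : Int × List String :=
  frames.foldl (fun p fr => let r := DFS_go (pvU nb p.2 + 1) fr.1 nb p.2 fr.2; (p.1 + r.1, r.2)) (0, v)

lemma runA_shift (nb : List (String × List String)) :
    ∀ (frames : List (String × Int)) (a : Int) (v : List String),
      frames.foldl (fun p fr => let r := DFS_go (pvU nb p.2 + 1) fr.1 nb p.2 fr.2; (p.1 + r.1, r.2)) (a, v)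
        = (a + (runA nb frames v).1, (runA nb frames v).2) := by
  intro frames
  induction frames with
  | nil => intro a v; simp [runA]
  | cons fr frames ih =>
    intro a v
    simp only [runA, List.foldl_cons]
    rw [ih, ih]
    simp only [Prod.mk.injEq]
    exact ⟨by ring, trivial⟩

lemma runA_cons (nb : List (String × List String)) (fr : String × Int) (frames : List (String × Int)) (v : List String) :
    runA nb (fr :: frames) v
      = ((DFS_go (pvU nb v + 1) fr.1 nb v fr.2).1 + (runA nb frames (DFS_go (pvU nb v + 1) fr.1 nb v fr.2).2).1,
         (runA nb frames (DFS_go (pvU nb v + 1) fr.1 nb v fr.2).2).2) := by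
  simp only [runA, List.foldl_cons]
  rw [runA_shift]
  simp only [runA, Prod.mk.injEq]
  exact ⟨by ring, trivial⟩

lemma runA_append (nb : List (String × List String)) (xs ys : List (String × Int)) (v : List String) :
    runA nb (xs ++ ys) v
      = ((runA nb xs v).1 + (runA nb ys (runA nb xs v).2).1, (runA nb ys (runA nb xs v).2).2) := by
  simp only [runA, List.foldl_append]
  have h := runA_shift nb ys (runA nb xs v).1 (runA nb xs v).2
  simpa only [runA] using h

lemma fold_children_runA (nb : List (String × List String)) (g : Nat) (d : Int) :
    ∀ (cs : List String) (a : Int) (w : List String), pvU nb w < g →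
      cs.foldl (fun p c => let r := DFS_go g c nb p.2 (d+1); (p.1 + r.1, r.2)) (a, w)
        = (a + (runA nb (cs.map (fun c => (c, d+1))) w).1, (runA nb (cs.map (fun c => (c, d+1))) w).2) := by
  intro cs
  induction cs with
  | nil => intro a w _; simp [runA]
  | cons c cs ihc =>
    intro a w hw
    simp only [List.foldl_cons, List.map_cons]
    have hc : DFS_go g c nb w (d+1) = DFS_go (pvU nb w + 1) c nb w (d+1) :=
      go_fuel_congr nb g (pvU nb w + 1) c w (d+1) hw (Nat.lt_succ_self _)
    rw [hc]
    have hU : pvU nb ((DFS_go (pvU nb w + 1) c nb w (d+1)).2) < g :=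
      lt_of_le_of_lt (go_U_le nb _ c w (d+1)) hw
    rw [ihc _ _ hU, runA_cons]
    simp only [Prod.mk.injEq]
    exact ⟨by ring, trivial⟩

lemma push_rev (d : Int) :
    ∀ (cs : List String) (rest : List (String × Int)),
      cs.reverse.foldl (fun st c => (c, d+1) :: st) rest = cs.map (fun c => (c, d+1)) ++ rest := by
  intro cs
  induction cs with
  | nil => intro rest; rfl
  | cons c cs ih =>
    intro rest
    simp only [List.reverse_cons, List.foldl_append, List.foldl_cons, List.foldl_nil, List.map_cons]
    rw [ih]
    rfl

lemma loop_eq (nb : List (String × List String)) :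
    ∀ (fB : Nat) (frames : List (String × Int)) (v : List String) (acc : Int),
      pvU nb v < fB → DFS_alt_loop fB nb frames v acc = acc + (runA nb frames v).1 := by
  intro fB
  induction fB with
  | zero => intro frames v acc h; omega
  | succ fB ih =>
    intro frames
    induction frames with
    | nil => intro v acc _; simp [DFS_alt_loop, runA]
    | cons fr rest ihr =>
      intro v acc hv
      obtain ⟨n, d⟩ := fr
      simp only [DFS_alt_loop]
      split
      · rename_i hguard
        have hkey : n ∈ nb.map Prod.fst := by
          rcases Bool.and_eq_true_iff.mp hguard with ⟨_, h2⟩; simpa using h2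
        have hnv : v.contains n = false := by
          rcases Bool.and_eq_true_iff.mp hguard with ⟨h1, _⟩
          cases hc : v.contains n
          · rfl
          · rw [hc] at h1; simp at h1
        have hlt := pvU_append_lt nb hkey hnv
        rw [push_rev, ih _ _ _ (by omega), runA_append, runA_cons]
        have hr : DFS_go (pvU nb v + 1) n nb v d
            = ((if n == "SAN" then d else 0) + (runA nb ((pvChildren nb n).map (fun c => (c, d+1))) (v ++ [n])).1,
               (runA nb ((pvChildren nb n).map (fun c => (c, d+1))) (v ++ [n])).2) := by
          simp only [DFS_go, hguard, if_true]
          exact fold_children_runA nb (pvU nb v) d (pvChildren nb n) _ _ hlt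
        rw [hr]
        cases hs : (n == "SAN") <;> simp [hs] <;> ring
      · rename_i hguard
        rw [ihr _ _ hv, runA_cons]
        have hr : DFS_go (pvU nb v + 1) n nb v d = ((if n == "SAN" then d else 0), v) := by
          simp only [DFS_go, hguard]
          simp
        rw [hr]
        cases hs : (n == "SAN") <;> simp [hs] <;> ring

theorem DFS_eq_alt (node : String) (nb : List (String × List String)) (v : List String) (d : Int) :
    DFS node nb v d = DFS_alt node nb v d := by
  have hfuel : pvU nb v < nb.length + 1 := Nat.lt_succ_of_le (pvU_le_len nb v)
  unfold DFS DFS_alt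
  rw [loop_eq nb _ _ _ _ hfuel]
  have h1 : runA nb [(node, d)] v = (((DFS_go (pvU nb v + 1) node nb v d).1) + 0, (DFS_go (pvU nb v + 1) node nb v d).2) := by
    rw [runA_cons]; simp [runA]
  rw [h1]
  rw [go_fuel_congr nb (nb.length + 1) (pvU nb v + 1) node v d hfuel (Nat.lt_succ_self _)]
  ring

-- ===== VERDICT (by name: the statement is the Claim_ definition above) =====
theorem DFS_spec : Claim_equal_DFS := by
  intro node neibours visited node_depth _
  exact DFS_eq_alt node neibours visited node_depth
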